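-- pv_equiv track=rewrite | github.com/thonisklim/Ruslan_Usachov | SA/L2/polinomes.py | do_lagerr_polinom
-- ===== SOURCE A (Python) =====
-- def do_lagerr_polinom(x, n):
--     T = 0
--     if n == 0:
--         T = 1
--     elif n == 1:
--         T = -x+1
--     else:
--         T = (2*n+1-x) * do_lagerr_polinom(x, n-1) - n**2 * do_lagerr_polinom(x, n-2)
--     return T
-- ===== SOURCE B (Python) =====
-- def do_lagerr_polinom(x, n):
--     if n == 0:
--         return 1
--     a, b = 1, 1 - x
--     for k in range(2, n + 1):
--         a, b = b, (2 * k + 1 - x) * b - k * k * a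
--     return b
-- ===== Notes on version B (the rewrite author's own statement) =====
-- stated objective: faster
-- what changed: Replaces the naive exponential double recursion with an iterative bottom-up loop keeping only the last two polynomial values.
import Mathlib
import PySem

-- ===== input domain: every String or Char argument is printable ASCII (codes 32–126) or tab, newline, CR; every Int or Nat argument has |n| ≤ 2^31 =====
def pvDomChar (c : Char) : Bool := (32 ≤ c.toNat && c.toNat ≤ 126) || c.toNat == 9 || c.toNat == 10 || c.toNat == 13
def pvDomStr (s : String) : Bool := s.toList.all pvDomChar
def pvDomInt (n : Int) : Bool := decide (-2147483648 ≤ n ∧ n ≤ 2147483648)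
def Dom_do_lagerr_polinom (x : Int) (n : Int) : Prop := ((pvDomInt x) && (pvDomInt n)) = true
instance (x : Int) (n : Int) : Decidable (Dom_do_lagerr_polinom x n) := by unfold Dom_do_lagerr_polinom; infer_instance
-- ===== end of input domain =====

-- B replaces A's exponential double recursion by an O(n) bottom-up loop keeping the last two values.


-- ===== PORT A =====
-- A's recursion, on the nonnegative argument (Python diverges for n < 0; excluded by Pre_):
def lagA (x : Int) : Nat → Int
  | 0 => 1
  | 1 => -x + 1
  | (m + 2) => (2 * ((m : Int) + 2) + 1 - x) * lagA x (m + 1) - ((m : Int) + 2) ^ 2 * lagA x m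

def do_lagerr_polinom (x : Int) (n : Int) : Int :=
  if n < 0 then 0 else lagA x n.toNat

-- ===== PORT B =====
def do_lagerr_polinom_alt (x : Int) (n : Int) : Int :=
  if n == 0 then 1
  else
    let p := (PySem.List.pyRange 2 (n + 1) 1).foldl
      (fun (ab : Int × Int) k => (ab.2, (2 * k + 1 - x) * ab.2 - k * k * ab.1)) (1, 1 - x)
    p.2

-- ===== PRECONDITION & SPEC =====
-- Pre_ excludes n < 0, on which the Python A recurses without a base case (RecursionError).
def Pre_do_lagerr_polinom (x : Int) (n : Int) : Prop := 0 ≤ n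
instance (x : Int) (n : Int) : Decidable (Pre_do_lagerr_polinom x n) := by
  unfold Pre_do_lagerr_polinom; infer_instance

def pvWitness_do_lagerr_polinom : Int × Int := (3, 4)

def Spec_do_lagerr_polinom (x : Int) (n : Int) (out : Int) : Prop := out = do_lagerr_polinom_alt x n
instance (x : Int) (n : Int) (out : Int) : Decidable (Spec_do_lagerr_polinom x n out) := by
  unfold Spec_do_lagerr_polinom; infer_instance

-- ===== CLAIM (what is proved, stated in full; the proofs are below) =====
def Claim_equal_do_lagerr_polinom : Prop := ∀ (x : Int) (n : Int), Dom_do_lagerr_polinom x n → Pre_do_lagerr_polinom x n → Spec_do_lagerr_polinom x n (do_lagerr_polinom x n)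

-- ===== LEMMAS AND PROOFS =====

-- The loop over range(2, m+2) produces the last two recurrence values.
theorem lag_loop (x : Int) (m : Nat) :
    (PySem.List.pyRange 2 ((m : Int) + 2) 1).foldl
      (fun (ab : Int × Int) k => (ab.2, (2 * k + 1 - x) * ab.2 - k * k * ab.1)) (1, 1 - x)
    = (lagA x m, lagA x (m + 1)) := by
  induction m with
  | zero =>
      rw [show ((0 : Nat) : Int) + 2 = 2 by norm_num, PySem.List.pyRange_one_eq_nil (by norm_num)]
      simp [lagA]; ring
  | succ m ih =>
      rw [show ((m + 1 : Nat) : Int) + 2 = ((m : Int) + 2) + 1 by push_cast; ring,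
        PySem.List.pyRange_one_succ_right (by omega), List.foldl_append, ih]
      simp only [List.foldl_cons, List.foldl_nil]
      show (lagA x (m + 1), _) = (lagA x (m + 1), lagA x (m + 2))
      rw [show lagA x (m + 2)
        = (2 * ((m : Int) + 2) + 1 - x) * lagA x (m + 1) - ((m : Int) + 2) ^ 2 * lagA x m from rfl]
      rw [Prod.mk.injEq]; exact ⟨rfl, by ring⟩

-- ===== VERDICT (by name: the statement is the Claim_ definition above) =====
theorem do_lagerr_polinom_spec : Claim_equal_do_lagerr_polinom := by
  intro x n _ hn
  unfold Spec_do_lagerr_polinom do_lagerr_polinom do_lagerr_polinom_alt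
  rcases eq_or_lt_of_le hn with h0 | hpos
  · subst h0; simp [lagA]
  · rw [if_neg (by omega), if_neg (by simpa using hpos.ne')]
    obtain ⟨m, hm⟩ : ∃ m : Nat, n = (m : Int) + 1 :=
      ⟨(n - 1).toNat, by omega⟩
    subst hm
    rw [show (m : Int) + 1 + 1 = (m : Int) + 2 by ring, lag_loop]
    simp [show ((m : Int) + 1).toNat = m + 1 by omega]
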